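-- pv_equiv track=rewrite | github.com/binuka200/CSMBD21-Cloud-Computing-Binuka | reducer.py | reducer_highest_flights_per_person
-- ===== SOURCE A (Python) =====
-- def reducer_highest_flights_per_person(list):
--         """Single threaded Reducer to find the passenger with the highest number of flights
--         	Args:
-- 				list: summed passengers with number of flights
-- 		    Return:
-- 				list : list of passengers with the highest number of flights"""
--
--         max = 0
--         highest_passenger = []
--         highest_passenger_output = []
--         #Loop to find and assign the highest number of flights to max
--         for k,v in list:
--             if v>=max:
--                 max = v
--
--         #Loop to add the passengers with the highest number of flights(max)
--         for k,v in list: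
--             if v == max:
--                 highest_passenger.append(k)
--
--         #Loop passengers with the highest number of flights(max) and append the list as a tuple
--         for passenger in highest_passenger:
--             highest_passenger_output.append((passenger,max))
--
--         #Return the passenger with the highest number of flights
--         return highest_passenger_output
-- ===== SOURCE B (Python) =====
-- def reducer_highest_flights_per_person(list):
--     """Single pass: keep the running max (seeded at 0) and the keys that attain it."""
--     m = 0
--     keys = []
--     for k, v in list:
--         if v > m:
--             m = v
--             keys = [k]
--         elif v == m:
--             keys.append(k)
--     return [(k, m) for k in keys]
-- ===== Notes on version B (the rewrite author's own statement) =====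
-- stated objective: simpler
-- what changed: Replaces A's three passes (find max, collect matching keys, build tuples) with one pass maintaining the running max and the list of keys attaining it.
import Mathlib
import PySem

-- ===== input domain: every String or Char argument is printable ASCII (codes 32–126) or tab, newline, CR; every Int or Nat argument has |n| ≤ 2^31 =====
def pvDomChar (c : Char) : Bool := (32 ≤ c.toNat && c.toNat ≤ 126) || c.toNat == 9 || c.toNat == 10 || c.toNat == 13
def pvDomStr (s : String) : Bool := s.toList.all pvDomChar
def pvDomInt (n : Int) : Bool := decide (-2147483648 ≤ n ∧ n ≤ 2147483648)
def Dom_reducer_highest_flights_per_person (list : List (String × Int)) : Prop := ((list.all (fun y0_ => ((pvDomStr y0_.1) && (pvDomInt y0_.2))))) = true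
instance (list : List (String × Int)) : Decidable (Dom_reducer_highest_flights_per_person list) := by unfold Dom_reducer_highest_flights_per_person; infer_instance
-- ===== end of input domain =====

-- B replaces A's three passes with one pass that keeps the running max and the keys attaining it (simpler decomposition; same results).

-- ===== PORT A =====
-- three loops: find max (seeded 0, '>='), collect keys equal to max, build (key, max) tuples
def reducer_highest_flights_per_person (list : List (String × Int)) : List (String × Int) :=
  let max := list.foldl (fun m kv => if kv.2 ≥ m then kv.2 else m) 0
  let highest_passenger := list.foldl (fun acc kv => if kv.2 = max then acc ++ [kv.1] else acc) []
  highest_passenger.foldl (fun out p => out ++ [(p, max)]) []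

-- ===== PORT B =====
-- one loop over state (m, keys); then build the output from keys
def reducer_highest_flights_per_person_alt (list : List (String × Int)) : List (String × Int) :=
  let s := list.foldl (fun (s : Int × List String) kv =>
      if kv.2 > s.1 then (kv.2, [kv.1])
      else if kv.2 = s.1 then (s.1, s.2 ++ [kv.1])
      else s) (0, [])
  s.2.map (fun k => (k, s.1))

-- ===== PRECONDITION & SPEC =====
def Spec_reducer_highest_flights_per_person (list : List (String × Int)) (out : List (String × Int)) : Prop := out = reducer_highest_flights_per_person_alt list
instance (list : List (String × Int)) (out : List (String × Int)) : Decidable (Spec_reducer_highest_flights_per_person list out) := by unfold Spec_reducer_highest_flights_per_person; infer_instance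

-- ===== CLAIM (what is proved, stated in full; the proofs are below) =====
def Claim_equal_reducer_highest_flights_per_person : Prop := ∀ (list : List (String × Int)), Dom_reducer_highest_flights_per_person list → Spec_reducer_highest_flights_per_person list (reducer_highest_flights_per_person list)

-- ===== LEMMAS AND PROOFS =====

-- the running max of both programs, as a plain foldl max
def pvMaxFrom (m : Int) (l : List (String × Int)) : Int :=
  l.foldl (fun a kv => max a kv.2) m

theorem pvMaxFrom_cons (m : Int) (kv : String × Int) (t : List (String × Int)) :
    pvMaxFrom m (kv :: t) = pvMaxFrom (max m kv.2) t := rfl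

theorem le_pvMaxFrom (m : Int) (l : List (String × Int)) : m ≤ pvMaxFrom m l := by
  induction l generalizing m with
  | nil => simp [pvMaxFrom]
  | cons kv t ih =>
      rw [pvMaxFrom_cons]
      exact le_trans (le_max_left _ _) (ih _)

-- A's first loop computes pvMaxFrom
theorem loopA_max (l : List (String × Int)) (m : Int) :
    l.foldl (fun a kv => if kv.2 ≥ a then kv.2 else a) m = pvMaxFrom m l := by
  induction l generalizing m with
  | nil => rfl
  | cons kv t ih =>
      simp only [List.foldl_cons, pvMaxFrom_cons]
      rw [show (if kv.2 ≥ m then kv.2 else m) = max m kv.2 by split <;> omega]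
      exact ih _

-- B's loop: full characterisation of the final state
theorem loopB_state (l : List (String × Int)) (m : Int) (ks : List String) :
    l.foldl (fun (s : Int × List String) kv =>
      if kv.2 > s.1 then (kv.2, [kv.1])
      else if kv.2 = s.1 then (s.1, s.2 ++ [kv.1])
      else s) (m, ks)
    = (pvMaxFrom m l,
       (if m = pvMaxFrom m l then ks else [])
         ++ l.filterMap (fun kv => if kv.2 = pvMaxFrom m l then some kv.1 else none)) := by
  induction l generalizing m ks with
  | nil => simp [pvMaxFrom]
  | cons kv t ih =>
      rw [List.foldl_cons]
      by_cases h1 : kv.2 > m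
      · have hmax : max m kv.2 = kv.2 := by omega
        have hMne : m ≠ pvMaxFrom kv.2 t := by
          have := le_pvMaxFrom kv.2 t; omega
        simp only [pvMaxFrom_cons, List.filterMap_cons, hmax]
        rw [if_pos h1, ih, if_neg hMne, List.nil_append]
        by_cases h2 : kv.2 = pvMaxFrom kv.2 t
        · simp only [if_pos h2]; simp
        · simp only [if_neg h2]; simp
      · by_cases h2 : kv.2 = m
        · have hmax : max m kv.2 = m := by omega
          simp only [pvMaxFrom_cons, List.filterMap_cons, hmax]
          rw [if_neg h1, if_pos h2, ih, h2]
          by_cases h3 : m = pvMaxFrom m t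
          · simp only [if_pos h3]; simp
          · simp only [if_neg h3]
        · have hmax : max m kv.2 = m := by omega
          have hne : kv.2 ≠ pvMaxFrom m t := by
            have := le_pvMaxFrom m t; omega
          simp only [pvMaxFrom_cons, List.filterMap_cons, hmax]
          rw [if_neg h1, if_neg h2, ih]
          simp [hne]

-- A's second loop is a filterMap
theorem loopA_keys (l : List (String × Int)) (M : Int) (acc : List String) :
    l.foldl (fun acc kv => if kv.2 = M then acc ++ [kv.1] else acc) acc
    = acc ++ l.filterMap (fun kv => if kv.2 = M then some kv.1 else none) := by
  induction l generalizing acc with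
  | nil => simp
  | cons kv t ih =>
      simp only [List.foldl_cons, List.filterMap_cons]
      by_cases h : kv.2 = M <;> simp [h, ih]

-- ===== VERDICT (by name: the statement is the Claim_ definition above) =====
theorem reducer_highest_flights_per_person_spec : Claim_equal_reducer_highest_flights_per_person := by
  intro list _
  unfold Spec_reducer_highest_flights_per_person
  unfold reducer_highest_flights_per_person reducer_highest_flights_per_person_alt
  simp only [loopA_max, loopB_state, loopA_keys, PySem.List.foldl_append_singleton_eq_map,
    List.nil_append]
  simp
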